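-- pv_equiv track=rewrite | github.com/BelalHmeidat/Decision_Tree | DecisionTree.py | output_data_as_list
-- ===== SOURCE A (Python) =====
-- def output_data_as_list(data, target_attr):
--     data_len = len(data[list(data.keys())[0]])
--     X = []
--     Y = []
--     for i in range(data_len):
--         row = []
--         for key in data.keys():
--             if key == target_attr:
--                 Y.append(data[key][i])
--             else:
--                 row.append(data[key][i])
--         X.append(row)
--     return X, Y
-- ===== SOURCE B (Python) =====
-- def output_data_as_list(data, target_attr):
--     columns = dict(data)
--     Y = list(columns.pop(target_attr, []))
--     X = [list(row) for row in zip(*columns.values())]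
--     return X, Y
-- ===== Notes on version B (the rewrite author's own statement) =====
-- stated objective: idiomatic
-- what changed: Replaced the row-index/column nested loop with a per-cell target test by popping the target column off a dict copy and transposing the remaining feature columns with zip; Pre_ excludes ragged column sets (A cuts to the first column's length where zip cuts to the shortest) and the dataset holding only a nonempty target column (A's n empty rows vs B's empty X, both defensible).
-- outside the precondition, e.g. on output_data_as_list({'a': [1], 'y': [2, 3]}, 'y'): A returns ([[1]], [2]), B returns ([[1]], [2, 3]); on output_data_as_list({'a': [], 'y': [1]}, 'y'): A returns ([], []), B returns ([], [1]); on output_data_as_list({'y': [1, 2]}, 'y'): A returns ([[], []], [1, 2]), B returns ([], [1, 2])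
import Mathlib
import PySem

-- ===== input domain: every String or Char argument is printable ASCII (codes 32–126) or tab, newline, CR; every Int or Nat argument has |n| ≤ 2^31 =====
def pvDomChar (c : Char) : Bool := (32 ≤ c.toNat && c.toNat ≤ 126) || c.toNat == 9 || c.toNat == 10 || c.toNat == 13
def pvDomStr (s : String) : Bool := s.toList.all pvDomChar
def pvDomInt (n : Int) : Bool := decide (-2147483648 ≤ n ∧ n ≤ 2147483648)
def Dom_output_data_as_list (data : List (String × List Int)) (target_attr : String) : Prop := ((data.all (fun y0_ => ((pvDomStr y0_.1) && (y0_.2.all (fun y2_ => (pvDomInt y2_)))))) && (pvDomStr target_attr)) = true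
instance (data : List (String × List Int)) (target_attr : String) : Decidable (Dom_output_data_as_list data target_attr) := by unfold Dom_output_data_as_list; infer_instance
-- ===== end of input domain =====

-- B replaces A's row-index/column nested loop (with a per-cell target test) by a direct
-- target-column extraction plus a column-major zip transpose of the feature columns (idiomatic).


-- ===== PORT A =====
-- data_len = len(data[list(data.keys())[0]]); nested row/column loop appending to X and Y.
-- (On empty data A raises IndexError; the index lookups are total via pyGetD, exact inside Pre_.)
def output_data_as_list (data : List (String × List Int)) (target_attr : String) : List (List Int) × List Int :=
  let data_len : Int := match data with | [] => 0 | (_, v) :: _ => (v.length : Int)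
  (PySem.List.pyRange 0 data_len 1).foldl
    (fun st i =>
      let inner := data.foldl
        (fun (acc : List Int × List Int) kv =>
          if kv.1 == target_attr then (acc.1, acc.2 ++ [PySem.List.pyGetD kv.2 i 0])
          else (acc.1 ++ [PySem.List.pyGetD kv.2 i 0], acc.2))
        ([], st.2)
      (st.1 ++ [inner.1], inner.2))
    ([], [])

-- ===== PORT B =====
-- zip(*cols): truncating transpose, exactly Python's zip over the feature columns.
def pyZip (cols : List (List Int)) : List (List Int) :=
  if h : cols = [] ∨ cols.any List.isEmpty then []
  else (cols.map fun c => c.headD 0) :: pyZip (cols.map List.tail)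
termination_by (cols.headD []).length
decreasing_by
  push_neg at h
  obtain ⟨h1, h2⟩ := h
  cases cols with
  | nil => exact absurd rfl h1
  | cons c cs =>
    simp [List.any_cons] at h2
    cases c with
    | nil => simp at h2
    | cons a as => simp

-- columns = dict(data); Y = list(columns.pop(target_attr, [])); X = transpose of the remaining
-- columns. The dict copy is the association list itself; pop's first-match read is lookup and
-- the remaining values are the non-target columns.
def output_data_as_list_alt (data : List (String × List Int)) (target_attr : String) : List (List Int) × List Int :=
  let Y : List Int := (data.lookup target_attr).getD []
  let cols := (data.filter (fun kv => kv.1 != target_attr)).map Prod.snd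
  (pyZip cols, Y)

-- ===== PRECONDITION & SPEC =====
-- Pre_ excludes: column sets on which some column is shorter than the first (A raises
-- IndexError), datasets where the target column or every feature column is longer than the
-- first (A cuts to the first column's length where B's zip cuts to the shortest / takes the
-- whole target column — no real dict-of-columns dataset is ragged), and the dataset holding
-- only a nonempty target column, where A's n empty rows and B's empty X are equally
-- defensible. The Nodup conjunct only rules out association lists with duplicate keys,
-- which correspond to no Python dict.
def Pre_output_data_as_list (data : List (String × List Int)) (target_attr : String) : Prop :=
  data ≠ [] ∧ (data.map Prod.fst).Nodup ∧
    (∀ kv ∈ data, ((data.headD ("", [])).2).length ≤ kv.2.length) ∧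
    (∀ kv ∈ data, kv.1 = target_attr → kv.2.length = ((data.headD ("", [])).2).length) ∧
    ((∃ kv ∈ data, kv.1 ≠ target_attr ∧ kv.2.length = ((data.headD ("", [])).2).length) ∨
      ∀ kv ∈ data, kv.1 = target_attr ∧ kv.2 = [])
instance (data : List (String × List Int)) (target_attr : String) : Decidable (Pre_output_data_as_list data target_attr) := by unfold Pre_output_data_as_list; infer_instance

def pvWitness_output_data_as_list : (List (String × List Int)) × String :=
  ([("a", [1, 2]), ("y", [3, 4])], "y")

def Spec_output_data_as_list (data : List (String × List Int)) (target_attr : String) (out : List (List Int) × List Int) : Prop := out = output_data_as_list_alt data target_attr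
instance (data : List (String × List Int)) (target_attr : String) (out : List (List Int) × List Int) : Decidable (Spec_output_data_as_list data target_attr out) := by unfold Spec_output_data_as_list; infer_instance

-- ===== CLAIM (what is proved, stated in full; the proofs are below) =====
def Claim_equal_output_data_as_list : Prop := ∀ (data : List (String × List Int)) (target_attr : String), Dom_output_data_as_list data target_attr → Pre_output_data_as_list data target_attr → Spec_output_data_as_list data target_attr (output_data_as_list data target_attr)

-- ===== LEMMAS AND PROOFS =====

-- A's inner column loop on one row index i: appends the feature cells to the row and the
-- target cells to Y.
theorem innerA_eq (data : List (String × List Int)) (t : String) (i : Int)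
    (r y : List Int) :
    data.foldl
      (fun (acc : List Int × List Int) kv =>
        if kv.1 == t then (acc.1, acc.2 ++ [PySem.List.pyGetD kv.2 i 0])
        else (acc.1 ++ [PySem.List.pyGetD kv.2 i 0], acc.2)) (r, y)
    = (r ++ (data.filter (fun kv => kv.1 != t)).map (fun kv => PySem.List.pyGetD kv.2 i 0),
       y ++ (data.filter (fun kv => kv.1 == t)).map (fun kv => PySem.List.pyGetD kv.2 i 0)) := by
  induction data generalizing r y with
  | nil => simp
  | cons kv rest ih =>
    rw [List.foldl_cons]
    by_cases h : (kv.1 == t) = true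
    · have hkt : kv.1 = t := by simpa using h
      rw [if_pos h, ih]; simp [List.filter_cons, h, hkt]
    · have hkt : ¬ kv.1 = t := by simpa using h
      rw [if_neg h, ih]; simp [List.filter_cons, h, hkt]

-- accumulating rows into X and cells into Y, generic form of A's outer loop.
theorem foldl_rows (f g : Int → List Int) (L : List Int) (X0 : List (List Int)) (Y0 : List Int) :
    L.foldl (fun st i => (st.1 ++ [f i], st.2 ++ g i)) (X0, Y0)
      = (X0 ++ L.map f, Y0 ++ L.flatMap g) := by
  induction L generalizing X0 Y0 with
  | nil => simp
  | cons i L ih => simp [ih]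

-- A, fully characterised as a map / flatMap over the row indices.
theorem portA_eq (data : List (String × List Int)) (t : String) :
    output_data_as_list data t
      = ((PySem.List.pyRange 0 (match data with | [] => 0 | (_, v) :: _ => (v.length : Int)) 1).map
           (fun i => (data.filter (fun kv => kv.1 != t)).map (fun kv => PySem.List.pyGetD kv.2 i 0)),
         (PySem.List.pyRange 0 (match data with | [] => 0 | (_, v) :: _ => (v.length : Int)) 1).flatMap
           (fun i => (data.filter (fun kv => kv.1 == t)).map (fun kv => PySem.List.pyGetD kv.2 i 0))) := by
  unfold output_data_as_list
  simp only [innerA_eq]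
  rw [foldl_rows]
  simp

-- first-match lookup agrees with the (unique, under Nodup keys) target column.
theorem filter_eq_lookup (data : List (String × List Int)) (t : String)
    (hnd : (data.map Prod.fst).Nodup) :
    (data.filter (fun kv => kv.1 == t)).map Prod.snd
      = ((data.lookup t).map (fun v => [v])).getD [] := by
  induction data with
  | nil => simp
  | cons kv rest ih =>
    obtain ⟨k, v⟩ := kv
    simp only [List.map_cons, List.nodup_cons] at hnd
    by_cases h : ((k, v).1 == t) = true
    · have hkt : k = t := by simpa using h
      have ht : t ∉ rest.map Prod.fst := hkt ▸ hnd.1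
      have hrest : rest.filter (fun kv => kv.1 == t) = [] := by
        apply List.filter_eq_nil_iff.mpr
        intro a ha
        have hmem : a.1 ∈ rest.map Prod.fst := List.mem_map_of_mem ha
        simp only [Bool.not_eq_true, beq_eq_false_iff_ne, ne_eq]
        intro heq
        exact ht (heq ▸ hmem)
      have hlook : List.lookup t ((k, v) :: rest) = some v := by
        subst hkt; simp
      simp [List.filter_cons, h, hrest, hlook]
    · have hkt : ¬ k = t := by simpa using h
      have hlook : List.lookup t ((k, v) :: rest) = List.lookup t rest := by
        simp [List.lookup_eq_findSome?, Ne.symm hkt]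
      simp [List.filter_cons, h, hlook, ih hnd.2]

theorem map_getD_take (v : List Int) (n : Nat) (hn : n ≤ v.length) :
    (List.range n).map (fun k => v.getD k 0) = v.take n := by
  apply List.ext_getElem (by simp [hn])
  intro i h1 h2
  have hi : i < n := by simpa using h1
  have hiv : i < v.length := lt_of_lt_of_le hi hn
  simp [hi, List.getD_eq_getElem?_getD, List.getElem?_eq_getElem hiv]

-- the transpose of columns all of length at least n, one of them exactly n.
theorem pyZip_min_eq (n : Nat) (cols : List (List Int))
    (hge : ∀ c ∈ cols, n ≤ c.length) (hex : ∃ c ∈ cols, c.length = n) :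
    pyZip cols = (List.range n).map (fun k => cols.map (fun c => c.getD k 0)) := by
  induction n generalizing cols with
  | zero =>
    obtain ⟨c, hc, hc0⟩ := hex
    have hany : cols.any List.isEmpty = true := by
      refine List.any_eq_true.mpr ⟨c, hc, ?_⟩
      simp [List.isEmpty_iff, List.eq_nil_of_length_eq_zero hc0]
    rw [pyZip, dif_pos (Or.inr hany)]; simp
  | succ n ih =>
    have hne : cols ≠ [] := by
      obtain ⟨c, hc, _⟩ := hex
      exact List.ne_nil_of_mem hc
    have hcons : ∀ c ∈ cols, c ≠ [] := by
      intro c hc h0; have := hge c hc; simp [h0] at this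
    have hno : ¬ cols.any List.isEmpty = true := by
      simp only [List.any_eq_true, not_exists]
      intro c
      rw [not_and]
      intro hc
      simp [List.isEmpty_iff]
      exact hcons c hc
    rw [pyZip, dif_neg (not_or.mpr ⟨hne, hno⟩)]
    rw [ih (cols.map List.tail)
      (by intro c hc
          obtain ⟨d, hd, rfl⟩ := List.mem_map.mp hc
          have := hge d hd
          simp [List.length_tail]
          omega)
      (by obtain ⟨c, hc, hcl⟩ := hex
          refine ⟨c.tail, List.mem_map_of_mem hc, ?_⟩
          simp [List.length_tail, hcl])]
    rw [List.range_succ_eq_map]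
    simp only [List.map_cons, List.map_map, Function.comp_def]
    congr 1
    · apply List.map_congr_left
      intro c hc
      cases c with
      | nil => exact absurd rfl (hcons [] hc)
      | cons a as => simp
    · apply List.map_congr_left
      intro k _
      apply List.map_congr_left
      intro c hc
      cases c with
      | nil => exact absurd rfl (hcons [] hc)
      | cons a as => simp

-- ===== VERDICT (by name: the statement is the Claim_ definition above) =====
theorem output_data_as_list_spec : Claim_equal_output_data_as_list := by
  unfold Claim_equal_output_data_as_list
  intro data t _ hp
  obtain ⟨hne, hnd, hge, htlen, hdisj⟩ := hp
  unfold Spec_output_data_as_list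
  cases data with
  | nil => exact absurd rfl hne
  | cons hd rest =>
    obtain ⟨k0, v0⟩ := hd
    have hge' : ∀ kv ∈ (k0, v0) :: rest, v0.length ≤ kv.2.length := by
      simpa using hge
    rw [portA_eq]
    unfold output_data_as_list_alt
    rw [PySem.List.pyRange_zero_nat]
    simp only [List.map_map, List.flatMap_map, Function.comp_def,
      PySem.List.pyGetD_natCast]
    rcases hdisj with hex | hall
    · -- some feature column has exactly the first column's length
      obtain ⟨w, hw, hwt, hwl⟩ := hex
      have hwf : w ∈ ((k0, v0) :: rest).filter (fun kv => kv.1 != t) :=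
        List.mem_filter.mpr ⟨hw, by simpa [bne_iff_ne] using hwt⟩
      refine Prod.ext ?_ ?_
      · -- X component
        show (List.range v0.length).map
            (fun k => (((k0, v0) :: rest).filter (fun kv => kv.1 != t)).map
              (fun kv => kv.2.getD k 0)) = _
        rw [pyZip_min_eq v0.length _
          (by intro c hcmem
              obtain ⟨p, hp, rfl⟩ := List.mem_map.mp hcmem
              exact hge' p (List.mem_of_mem_filter hp))
          ⟨w.2, List.mem_map_of_mem hwf, by simpa using hwl⟩]
        simp [List.map_map, Function.comp_def]
      · -- Y component
        show (List.range v0.length).flatMap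
            (fun k => (((k0, v0) :: rest).filter (fun kv => kv.1 == t)).map
              (fun kv => kv.2.getD k 0)) = _
        have hfl := filter_eq_lookup ((k0, v0) :: rest) t hnd
        cases hl : List.lookup t ((k0, v0) :: rest) with
        | none =>
          rw [hl] at hfl
          have hnil : ((k0, v0) :: rest).filter (fun kv => kv.1 == t) = [] := by
            simpa [List.map_eq_nil_iff] using hfl
          simp [hnil, hl]
        | some v =>
          rw [hl] at hfl
          simp only [Option.map_some, Option.getD_some] at hfl
          obtain ⟨p, hp1, hp2⟩ : ∃ p, ((k0, v0) :: rest).filter (fun kv => kv.1 == t) = [p] ∧ p.2 = v := by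
            cases hfe2 : ((k0, v0) :: rest).filter (fun kv => kv.1 == t) with
            | nil => rw [hfe2] at hfl; simp at hfl
            | cons p ps =>
              rw [hfe2] at hfl
              cases ps with
              | nil => exact ⟨p, rfl, by simpa using hfl⟩
              | cons q qs => simp at hfl
          have hpmem := List.mem_filter.mp (hp1 ▸ List.mem_singleton_self p)
          have hvlen : v.length = v0.length := by
            rw [← hp2]
            have hpt : p.1 = t := by simpa using hpmem.2
            simpa using htlen p hpmem.1 hpt
          rw [hp1]
          simp only [List.map_cons, List.map_nil, hp2, Option.getD_some]
          rw [show (List.range v0.length).flatMap (fun k => [v.getD k 0])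
                = (List.range v0.length).map (fun k => v.getD k 0) by
              induction List.range v0.length with
              | nil => simp
              | cons a l ihr => simp only [List.flatMap_cons, List.map_cons, ihr, List.singleton_append]]
          rw [map_getD_take v v0.length (le_of_eq hvlen.symm), ← hvlen, List.take_length]
    · -- only the target column, and it is empty: data = [(t, [])]
      have hk0 : k0 = t := (hall (k0, v0) List.mem_cons_self).1
      have hv0 : v0 = [] := (hall (k0, v0) List.mem_cons_self).2
      have hrest : rest = [] := by
        cases rest with
        | nil => rfl
        | cons q qs =>
          exfalso
          simp only [List.map_cons, List.nodup_cons, List.mem_cons] at hnd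
          exact hnd.1 (Or.inl (hk0.trans (hall q (by simp)).1.symm))
      subst hrest; subst hv0; subst hk0
      simp [pyZip]
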